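-- pv_equiv track=rewrite | github.com/Catalitium/catalitium | app/utils.py | disposable_email_domain
-- ===== SOURCE A (Python) =====
-- _DISPOSABLE_DOMAINS = frozenset({
--     "mailinator.com", "guerrillamail.com", "guerrillamailblock.com",
--     "sharklasers.com", "yopmail.com", "yopmail.net", "trashmail.com",
--     "tempmail.com", "dispostable.com", "maildrop.cc", "getairmail.com",
--     "10minutemail.com", "fakeinbox.com", "burnermail.io", "trashmail.de",
--     "mailnesia.com", "mailcatch.com", "temp-mail.org", "emailondeck.com",
--     "throwaway.email", "grr.la", "moza.pl", "byom.de", "spam4.me",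
--     "mailnull.com", "mailscrap.com", "tmpmail.net", "tmpmail.org",
-- })
--
-- def disposable_email_domain(email: str) -> bool:
--     """True for known throwaway inboxes (best-effort list)."""
--     at = (email or "").rfind("@")
--     if at < 0:
--         return False
--     dom = email[at + 1:].lower().strip()
--     if dom in _DISPOSABLE_DOMAINS:
--         return True
--     return any(dom.endswith("." + d) for d in _DISPOSABLE_DOMAINS)
-- ===== SOURCE B (Python) =====
-- _DISPOSABLE_DOMAINS = frozenset({
--     "mailinator.com", "guerrillamail.com", "guerrillamailblock.com",
--     "sharklasers.com", "yopmail.com", "yopmail.net", "trashmail.com",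
--     "tempmail.com", "dispostable.com", "maildrop.cc", "getairmail.com",
--     "10minutemail.com", "fakeinbox.com", "burnermail.io", "trashmail.de",
--     "mailnesia.com", "mailcatch.com", "temp-mail.org", "emailondeck.com",
--     "throwaway.email", "grr.la", "moza.pl", "byom.de", "spam4.me",
--     "mailnull.com", "mailscrap.com", "tmpmail.net", "tmpmail.org",
-- })
--
--
-- def disposable_email_domain(email: str) -> bool:
--     """True for known throwaway inboxes (best-effort list)."""
--     _local, sep, domain = email.rpartition("@")
--     if not sep:
--         return False
--     dom = domain.lower().strip()
--     if dom in _DISPOSABLE_DOMAINS: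
--         return True
--     return any(dom[i + 1:] in _DISPOSABLE_DOMAINS
--                for i, ch in enumerate(dom) if ch == ".")
-- ===== Notes on version B (the rewrite author's own statement) =====
-- stated objective: alternative
-- what changed: B splits the address with rpartition and then walks the domain's own dot positions, doing one set lookup per suffix after a dot, instead of A's rfind-and-slice followed by a scan over the whole disposable-domain set with an endswith test per entry.
import Mathlib
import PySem

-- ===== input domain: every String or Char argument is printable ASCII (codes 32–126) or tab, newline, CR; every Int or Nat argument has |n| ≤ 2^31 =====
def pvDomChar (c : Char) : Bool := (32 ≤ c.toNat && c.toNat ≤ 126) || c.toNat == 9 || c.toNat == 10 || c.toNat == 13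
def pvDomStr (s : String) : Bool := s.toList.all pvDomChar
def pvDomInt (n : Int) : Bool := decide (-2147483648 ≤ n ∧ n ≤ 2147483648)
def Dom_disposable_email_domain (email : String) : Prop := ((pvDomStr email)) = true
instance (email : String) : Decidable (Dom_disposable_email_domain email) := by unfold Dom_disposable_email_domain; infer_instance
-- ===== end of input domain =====

-- B replaces A's scan over the fixed domain set (one endswith per entry) by rpartition plus a
-- walk over the domain's own dot positions with one set lookup per dot suffix
-- (objective: alternative decomposition, same results).

-- ===== PORT A =====
-- the module constant _DISPOSABLE_DOMAINS (a frozenset literal, all entries distinct)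
def pvDisposables : List String :=
  ["mailinator.com", "guerrillamail.com", "guerrillamailblock.com",
   "sharklasers.com", "yopmail.com", "yopmail.net", "trashmail.com",
   "tempmail.com", "dispostable.com", "maildrop.cc", "getairmail.com",
   "10minutemail.com", "fakeinbox.com", "burnermail.io", "trashmail.de",
   "mailnesia.com", "mailcatch.com", "temp-mail.org", "emailondeck.com",
   "throwaway.email", "grr.la", "moza.pl", "byom.de", "spam4.me",
   "mailnull.com", "mailscrap.com", "tmpmail.net", "tmpmail.org"]

def pvDisposablesC : PySem.Set (List Char) := PySem.Set.ofList (pvDisposables.map String.toList)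

def disposable_email_domain (email : String) : Bool :=
  -- at = (email or "").rfind("@")
  let base := if PySem.Str.len email == 0 then "" else email
  let at_ := PySem.Str.rfind base "@"
  if at_ < 0 then false
  else
    -- dom = email[at+1:].lower().strip()
    let dom := PySem.Chars.strip (PySem.Chars.lower (PySem.Chars.slice email.toList (some (at_ + 1)) none))
    -- if dom in _DISPOSABLE_DOMAINS: return True
    if PySem.Set.contains pvDisposablesC dom then true
    -- any(dom.endswith("." + d) for d in _DISPOSABLE_DOMAINS)  (any over a set: order-independent)
    else pvDisposables.any (fun d => PySem.Chars.endswith dom ('.' :: d.toList))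

-- ===== PORT B =====
-- s.rpartition(sep), ported by hand: split at the HIGHEST occurrence of sep, ("", "", s) if absent.
-- Exact for nonempty sep: Chars.rfind gives Python's highest match index, the two slices are the
-- Python slices s[:i] and s[i+len(sep):].
def pvRPartition (s : List Char) (sep : List Char) : List Char × List Char × List Char :=
  let i := PySem.Chars.rfind s sep
  if i < 0 then ([], [], s)
  else (PySem.List.slice s none (some i), sep, PySem.List.slice s (some (i + sep.length)) none)

def disposable_email_domain_alt (email : String) : Bool :=
  let parts := pvRPartition email.toList ['@']
  if parts.2.1.length == 0 then false  -- `if not sep`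
  else
    let dom := PySem.Chars.strip (PySem.Chars.lower parts.2.2)
    if PySem.Set.contains pvDisposablesC dom then true
    else
      -- any(dom[i+1:] in _DISPOSABLE_DOMAINS for i, ch in enumerate(dom) if ch == ".")
      (PySem.List.enumerate dom 0).any fun p =>
        p.2 == '.' && PySem.Set.contains pvDisposablesC (PySem.List.slice dom (some (p.1 + 1)) none)

-- ===== PRECONDITION & SPEC =====
def Spec_disposable_email_domain (email : String) (out : Bool) : Prop := out = disposable_email_domain_alt email
instance (email : String) (out : Bool) : Decidable (Spec_disposable_email_domain email out) := by unfold Spec_disposable_email_domain; infer_instance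

-- ===== CLAIM (what is proved, stated in full; the proofs are below) =====
def Claim_equal_disposable_email_domain : Prop := ∀ (email : String), Dom_disposable_email_domain email → Spec_disposable_email_domain email (disposable_email_domain email)

-- ===== LEMMAS AND PROOFS =====

-- a dot-headed suffix of dom is exactly a '.' at some index k followed by dom.drop (k+1)
theorem dot_suffix_iff (dom : List Char) (x : List Char) :
    ('.' :: x <:+ dom) ↔ ∃ (k : Nat) (h : k < dom.length), dom[k] = '.' ∧ dom.drop (k + 1) = x := by
  constructor
  · rintro ⟨t, rfl⟩
    refine ⟨t.length, by simp, ?_, ?_⟩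
    · simp [List.getElem_append_right]
    · have h1 : (t ++ '.' :: x).drop t.length = '.' :: x := by simp
      have : (t ++ '.' :: x).drop (t.length + 1) = ('.' :: x).drop 1 := by
        rw [← List.drop_drop, h1]
      simpa using this
  · rintro ⟨k, h, hget, hdrop⟩
    have : dom.drop k = '.' :: x := by
      rw [List.drop_eq_getElem_cons h, hget, hdrop]
    rw [← this]
    exact List.drop_suffix k dom

-- membership in the ported frozenset, phrased over the string list
theorem contains_iff_mem (x : List Char) :
    PySem.Set.contains pvDisposablesC x = true ↔ ∃ d ∈ pvDisposables, d.toList = x := by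
  rw [PySem.Set.contains_iff]
  simp [pvDisposablesC, PySem.Set.mem_ofList]

-- A's pass over the set (endswith per entry) equals B's pass over the domain's dot positions
theorem anyTail_eq (dom : List Char) :
    (pvDisposables.any fun d => PySem.Chars.endswith dom ('.' :: d.toList)) =
    ((PySem.List.enumerate dom 0).any fun p =>
        p.2 == '.' && PySem.Set.contains pvDisposablesC (PySem.List.slice dom (some (p.1 + 1)) none)) := by
  rw [Bool.eq_iff_iff]
  simp only [List.any_eq_true, PySem.Chars.endswith_iff, PySem.List.mem_enumerate_iff]
  constructor
  · rintro ⟨d, hd, hs⟩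
    obtain ⟨k, h, hget, hdrop⟩ := (dot_suffix_iff dom d.toList).mp hs
    have hc : ((k : Int) + 1) = ((k + 1 : Nat) : Int) := by push_cast; ring
    have hm : PySem.Set.contains pvDisposablesC (dom.drop (k + 1)) = true :=
      (contains_iff_mem _).mpr ⟨d, hd, hdrop.symm⟩
    refine ⟨(↑k, dom[k]), ⟨k, h, by simp⟩, ?_⟩
    show ((dom[k] == '.') && PySem.Set.contains pvDisposablesC
        (PySem.List.slice dom (some ((k : Int) + 1)) none)) = true
    rw [hc, PySem.List.slice_from_natCast, hm, hget]
    decide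
  · rintro ⟨p, ⟨k, h, rfl⟩, hp⟩
    simp only [Bool.and_eq_true, beq_iff_eq] at hp
    obtain ⟨hget, hmem⟩ := hp
    have hcast : ((0 : Int) + ↑k + 1) = ((k + 1 : Nat) : Int) := by push_cast; ring
    rw [hcast, PySem.List.slice_from_natCast] at hmem
    obtain ⟨d, hd, hdl⟩ := (contains_iff_mem _).mp hmem
    exact ⟨d, hd, (dot_suffix_iff dom d.toList).mpr ⟨k, h, hget, hdl.symm⟩⟩

-- `email or ""` is email itself (Str.len email == 0 forces email = "")
theorem pvBase_eq (email : String) :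
    (if PySem.Str.len email == 0 then "" else email) = email := by
  split_ifs with h
  · have : email.toList = [] := by
      simpa [PySem.Str.len, PySem.Chars.len_eq, List.length_eq_zero_iff] using (beq_iff_eq.mp h)
    cases email
    simp_all
  · rfl

theorem pvAt : ("@" : String).toList = ['@'] := rfl

-- ===== VERDICT (by name: the statement is the Claim_ definition above) =====
theorem disposable_email_domain_spec : Claim_equal_disposable_email_domain := by
  intro email _
  unfold Spec_disposable_email_domain
  by_cases h : PySem.Chars.rfind email.toList ['@'] < 0
  · simp only [disposable_email_domain, disposable_email_domain_alt, pvRPartition, pvBase_eq,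
      PySem.Str.rfind_eq, pvAt, if_pos h, List.length_nil,
      show ((0 : Nat) == 0) = true from rfl, if_true]
  · simp only [disposable_email_domain, disposable_email_domain_alt, pvRPartition, pvBase_eq,
      PySem.Str.rfind_eq, pvAt, if_neg h, PySem.Chars.slice_eq_listSlice,
      List.length_cons, List.length_nil, Nat.zero_add, Nat.cast_one,
      show ((1 : Nat) == 0) = false from rfl, Bool.false_eq_true, if_false]
    rw [anyTail_eq]
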